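-- pv_equiv track=rewrite | github.com/Alexander7170/Actividades_Programacion_UTN | Actividades_Programacion_UTN/pygame/logica.py | obtener_posiciones_matriz_score
-- ===== SOURCE A (Python) =====
-- def obtener_posiciones_matriz_score(matriz_imagenes:list)->list:
--     posiciones_imagenes = []
--     eje_x = 30
--     eje_y = 100
--     for i in range(len(matriz_imagenes)):
--         posicion_imagen = []
--         for j in range(len(matriz_imagenes[i])):
--             posicion_imagen.append((eje_x,eje_y))
--             eje_x += 400
--         posiciones_imagenes.append(tuple(posicion_imagen))
--         eje_y += 50
--         eje_x = 30
--     return tuple(posiciones_imagenes)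
-- ===== SOURCE B (Python) =====
-- def obtener_posiciones_matriz_score(matriz_imagenes: list) -> list:
--     # Stage 1: one shared template of x-coordinates for the widest row, and the column of row heights.
--     ancho = max((len(fila) for fila in matriz_imagenes), default=0)
--     plantilla_x = list(range(30, 30 + 400 * ancho, 400))
--     alturas = range(100, 100 + 50 * len(matriz_imagenes), 50)
--     # Stage 2: each output row is a prefix of the template zipped with its repeated height.
--     return tuple(
--         tuple(zip(plantilla_x[:len(fila)], [y] * len(fila)))
--         for fila, y in zip(matriz_imagenes, alturas)
--     )
-- ===== Notes on version B (the rewrite author's own statement) =====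
-- stated objective: alternative
-- what changed: Replaced A's cell-by-cell double loop with threaded mutable counters by a staged construction: precompute one shared template list of x-coordinates for the widest row and a range of row heights, then assemble each output row as a slice of the template zipped with its repeated height.
import Mathlib
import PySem

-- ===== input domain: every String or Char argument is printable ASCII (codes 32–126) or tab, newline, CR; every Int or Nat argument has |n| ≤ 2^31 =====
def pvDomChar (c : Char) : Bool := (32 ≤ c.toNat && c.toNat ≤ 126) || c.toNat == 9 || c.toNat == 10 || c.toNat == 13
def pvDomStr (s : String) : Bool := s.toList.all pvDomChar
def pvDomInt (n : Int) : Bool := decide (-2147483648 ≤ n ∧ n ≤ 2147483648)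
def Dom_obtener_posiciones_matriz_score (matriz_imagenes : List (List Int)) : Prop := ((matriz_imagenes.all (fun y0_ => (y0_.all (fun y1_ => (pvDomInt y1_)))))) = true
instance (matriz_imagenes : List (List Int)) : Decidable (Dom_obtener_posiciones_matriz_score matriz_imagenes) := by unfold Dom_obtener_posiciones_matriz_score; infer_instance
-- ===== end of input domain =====

-- B replaces A's cell-by-cell double loop with mutable counters by a staged build: one shared
-- template of x-coordinates plus a range of heights, rows assembled by slice/zip; objective: alternative.

-- ===== PORT A =====
-- state: (posiciones_imagenes, eje_x, eje_y), threaded exactly as A's loops do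
def obtener_posiciones_matriz_score (matriz_imagenes : List (List Int)) : List (List (Int × Int)) :=
  (matriz_imagenes.foldl
    (fun (st : List (List (Int × Int)) × Int × Int) fila =>
      let inner := fila.foldl
        (fun (st2 : List (Int × Int) × Int) _ =>
          (st2.1 ++ [(st2.2, st.2.2)], st2.2 + 400))
        ([], st.2.1)
      (st.1 ++ [inner.1], 30, st.2.2 + 50))
    ([], 30, 100)).1

-- ===== PORT B =====
def obtener_posiciones_matriz_score_alt (matriz_imagenes : List (List Int)) : List (List (Int × Int)) :=
  let ancho : Int :=
    PySem.List.maxD (matriz_imagenes.map (fun fila => (fila.length : Int))) (fun x => x) 0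
  let plantilla_x : List Int := PySem.List.pyRange 30 (30 + 400 * ancho) 400
  let alturas : List Int := PySem.List.pyRange 100 (100 + 50 * (matriz_imagenes.length : Int)) 50
  (matriz_imagenes.zip alturas).map (fun p =>
    (PySem.List.slice plantilla_x none (some (p.1.length : Int))).zip
      (PySem.List.pyRepeat [p.2] (p.1.length : Int)))

-- ===== PRECONDITION & SPEC =====
def Spec_obtener_posiciones_matriz_score (matriz_imagenes : List (List Int)) (out : List (List (Int × Int))) : Prop := out = obtener_posiciones_matriz_score_alt matriz_imagenes
instance (matriz_imagenes : List (List Int)) (out : List (List (Int × Int))) : Decidable (Spec_obtener_posiciones_matriz_score matriz_imagenes out) := by unfold Spec_obtener_posiciones_matriz_score; infer_instance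

-- ===== CLAIM (what is proved, stated in full; the proofs are below) =====
def Claim_equal_obtener_posiciones_matriz_score : Prop := ∀ (matriz_imagenes : List (List Int)), Dom_obtener_posiciones_matriz_score matriz_imagenes → Spec_obtener_posiciones_matriz_score matriz_imagenes (obtener_posiciones_matriz_score matriz_imagenes)

-- ===== LEMMAS AND PROOFS =====

-- common closed form both ports are reduced to
def pvClosedForm (m : List (List Int)) : List (List (Int × Int)) :=
  (PySem.List.enumerate m 0).map (fun p =>
    (PySem.List.pyRange 0 p.2.length 1).map (fun j => (30 + 400 * j, 100 + 50 * p.1)))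

-- inner loop of A produces the closed-form row
lemma inner_row (fila : List Int) (acc : List (Int × Int)) (x y : Int) :
    (fila.foldl (fun (st2 : List (Int × Int) × Int) _ => (st2.1 ++ [(st2.2, y)], st2.2 + 400)) (acc, x)).1
      = acc ++ (PySem.List.pyRange 0 fila.length 1).map (fun j => (x + 400 * j, y)) := by
  induction fila generalizing acc x with
  | nil => simp [PySem.List.pyRange]
  | cons a t ih =>
    simp only [List.foldl_cons]
    rw [ih]
    have : (PySem.List.pyRange 0 (↑(a :: t).length) 1)
        = 0 :: (PySem.List.pyRange 1 (↑(a :: t).length) 1) := by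
      rw [PySem.List.pyRange_one_cons] <;> simp
    rw [this]
    have h2 : (PySem.List.pyRange 1 (↑(a :: t).length) 1)
        = (PySem.List.pyRange 0 (↑t.length) 1).map (fun j => j + 1) := by
      simp [PySem.List.pyRange_one]
      intro k _
      omega
    rw [h2]
    simp [List.map_map, Function.comp]
    intro a _ _
    ring

-- outer loop invariant (start index s generalizes enumerate's counter)
lemma outer_loop (m : List (List Int)) (acc : List (List (Int × Int))) (y s : Int) :
    (m.foldl
      (fun (st : List (List (Int × Int)) × Int × Int) fila =>
        let inner := fila.foldl
          (fun (st2 : List (Int × Int) × Int) _ => (st2.1 ++ [(st2.2, st.2.2)], st2.2 + 400))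
          ([], st.2.1)
        (st.1 ++ [inner.1], 30, st.2.2 + 50))
      (acc, 30, y)).1
    = acc ++ (PySem.List.enumerate m s).map (fun p =>
        (PySem.List.pyRange 0 p.2.length 1).map (fun j => (30 + 400 * j, y + 50 * (p.1 - s)))) := by
  induction m generalizing acc y s with
  | nil => simp [PySem.List.enumerate]
  | cons fila t ih =>
    simp only [List.foldl_cons, PySem.List.enumerate_cons]
    rw [ih _ _ (s + 1), inner_row]
    simp
    intro a b _ j _ _
    ring

lemma A_eq_closedForm (m : List (List Int)) :
    obtener_posiciones_matriz_score m = pvClosedForm m := by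
  unfold obtener_posiciones_matriz_score pvClosedForm
  rw [outer_loop _ _ _ 0]
  simp

-- B-side facts ------------------------------------------------------------

-- range(100, 100+50*L, 50) is the list of the L row heights
lemma alturas_eq (L : Nat) :
    PySem.List.pyRange 100 (100 + 50 * (L : Int)) 50
      = (List.range L).map (fun (k : Nat) => 100 + 50 * (k : Int)) := by
  rw [PySem.List.pyRange_of_pos _ _ (by norm_num : (0:Int) < 50)]
  have hcnt : (if (100:Int) < 100 + 50 * (L : Int)
      then ((100 + 50 * (L : Int) - 100 + 50 - 1) / 50).toNat else 0) = L := by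
    split_ifs with h <;> omega
  rw [hcnt]

-- range(30, 30+400*a, 400) is the template of a x-coordinates
lemma plantilla_eq (a : Int) (h : 0 ≤ a) :
    PySem.List.pyRange 30 (30 + 400 * a) 400
      = (List.range a.toNat).map (fun (k : Nat) => 30 + 400 * (k : Int)) := by
  rw [PySem.List.pyRange_of_pos _ _ (by norm_num : (0:Int) < 400)]
  have hcnt : (if (30:Int) < 30 + 400 * a
      then ((30 + 400 * a - 30 + 400 - 1) / 400).toNat else 0) = a.toNat := by
    split_ifs with hlt <;> omega
  rw [hcnt]

lemma zip_template_replicate (φ : Nat → Int) (n w : Nat) (h : n ≤ w) (y : Int) :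
    (((List.range w).map φ).take n).zip (List.replicate n y)
      = (List.range n).map (fun k => (φ k, y)) := by
  rw [← List.map_take, List.take_range]
  rw [min_eq_left h]
  apply List.ext_getElem
  · simp
  · intro i h1 h2
    simp

lemma enumerate_getElem {α : Type} (xs : List α) (s : Int) (i : Nat)
    (h : i < xs.length) :
    (PySem.List.enumerate xs s)[i]'(by simpa using h) = (s + i, xs[i]) := by
  induction xs generalizing s i with
  | nil => simp at h
  | cons a t ih =>
    cases i with
    | zero => simp [PySem.List.enumerate_cons]
    | succ k =>
      have hk : k < t.length := by simpa using h
      simp only [PySem.List.enumerate_cons, List.getElem_cons_succ]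
      rw [ih (s + 1) k hk]
      refine Prod.ext ?_ rfl
      push_cast
      ring

lemma ancho_nonneg (m : List (List Int)) :
    0 ≤ PySem.List.maxD (m.map (fun fila => (fila.length : Int))) (fun x => x) 0 := by
  unfold PySem.List.maxD
  cases hm : PySem.List.max? (m.map (fun fila => (fila.length : Int))) (fun x => x) with
  | none => simp
  | some v =>
    have := PySem.List.max?_mem hm
    simp only [List.mem_map] at this
    obtain ⟨fila, _, rfl⟩ := this
    simp

lemma len_le_ancho (m : List (List Int)) (fila : List Int) (hmem : fila ∈ m) :
    (fila.length : Int)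
      ≤ PySem.List.maxD (m.map (fun f => (f.length : Int))) (fun x => x) 0 := by
  unfold PySem.List.maxD
  cases hm : PySem.List.max? (m.map (fun f => (f.length : Int))) (fun x => x) with
  | none =>
    rw [PySem.List.max?_eq_none_iff, List.map_eq_nil_iff] at hm
    subst hm
    simp at hmem
  | some v =>
    have := PySem.List.max?_isMax hm ((fila.length : Int)) (List.mem_map_of_mem hmem)
    simpa using this

lemma B_eq_closedForm (m : List (List Int)) :
    obtener_posiciones_matriz_score_alt m = pvClosedForm m := by
  unfold obtener_posiciones_matriz_score_alt pvClosedForm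
  dsimp only
  have h0 := ancho_nonneg m
  rw [alturas_eq m.length,
      plantilla_eq (PySem.List.maxD (m.map (fun fila => (fila.length : Int))) (fun x => x) 0) h0]
  apply List.ext_getElem
  · simp [PySem.List.length_enumerate]
  · intro i h1 h2
    have hi : i < m.length := by simpa using h2
    simp only [List.getElem_map, List.getElem_zip, List.getElem_range]
    rw [enumerate_getElem m 0 i hi]
    simp only [zero_add]
    rw [PySem.List.slice_to_natCast, PySem.List.pyRepeat_singleton]
    have hle : m[i].length ≤ (PySem.List.maxD (m.map (fun fila => (fila.length : Int))) (fun x => x) 0).toNat := by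
      have := len_le_ancho m m[i] (List.getElem_mem hi)
      omega
    rw [Int.toNat_natCast,
        zip_template_replicate (fun k => 30 + 400 * (k : Int)) m[i].length
          (PySem.List.maxD (m.map (fun fila => (fila.length : Int))) (fun x => x) 0).toNat hle
          (100 + 50 * (i : Int)),
        PySem.List.pyRange_one]
    simp [List.map_map, Function.comp]

-- ===== VERDICT (by name: the statement is the Claim_ definition above) =====
theorem obtener_posiciones_matriz_score_spec : Claim_equal_obtener_posiciones_matriz_score := by
  intro m _
  show obtener_posiciones_matriz_score m = obtener_posiciones_matriz_score_alt m
  rw [A_eq_closedForm, B_eq_closedForm]
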